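-- pv_equiv track=rewrite | github.com/iamsavva/shortest-walk-through-gcs | shortest_walk_through_gcs/incremental_search.py | make_a_list_of_shortcuts
-- ===== SOURCE A (Python) =====
-- import typing as T  # pylint: disable=unused-import
--
-- def make_a_list_of_shortcuts(numbers:T.List[int], K:int, index:int=0):
--     assert 0 <= index and index < len(numbers)
--     res = []
--     for i in range(0,K+1):
--         if numbers[index] - i >= 1:
--             if index == len(numbers)-1:
--                 res.append( numbers[:index] + [numbers[index] - i] )
--             else:
--                 res = res + make_a_list_of_shortcuts( numbers[:index] + [numbers[index] - i] + numbers[index+1:], K, index+1 )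
--         else:
--             break
--     return res
-- ===== SOURCE B (Python) =====
-- def make_a_list_of_shortcuts(numbers, K, index=0):
--     assert 0 <= index and index < len(numbers)
--     res = [numbers[:index]]
--     for j in range(index, len(numbers)):
--         if not res:
--             break
--         x = numbers[j]
--         res = [c + [v] for c in res for v in range(x, max(x - K - 1, 0), -1)]
--     return res
-- ===== Notes on version B (the rewrite author's own statement) =====
-- stated objective: simpler
-- what changed: Replaces A's per-position recursion (which rebuilds the whole list and re-enters the function for every decrement) with a single left-to-right fold that extends each partial combination with the position's precomputed descending value list (iterative cartesian product).
import Mathlib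
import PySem

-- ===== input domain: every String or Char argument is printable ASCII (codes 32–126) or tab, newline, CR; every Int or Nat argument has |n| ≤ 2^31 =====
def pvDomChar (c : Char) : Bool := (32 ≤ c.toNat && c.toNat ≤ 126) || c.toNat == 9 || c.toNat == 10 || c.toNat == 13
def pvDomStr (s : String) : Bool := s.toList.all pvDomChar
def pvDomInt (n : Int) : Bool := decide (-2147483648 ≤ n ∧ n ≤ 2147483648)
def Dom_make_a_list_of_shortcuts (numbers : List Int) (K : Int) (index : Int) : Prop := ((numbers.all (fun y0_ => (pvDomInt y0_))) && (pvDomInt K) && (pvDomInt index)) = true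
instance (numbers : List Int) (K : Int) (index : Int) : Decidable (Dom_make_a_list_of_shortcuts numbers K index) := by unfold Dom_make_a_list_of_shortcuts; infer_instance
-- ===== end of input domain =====

-- B replaces A's per-position recursion (one recursive call per decrement) by a single left-to-right
-- fold that extends every partial combination with the precomputed descending value list of the next
-- position (iterative cartesian product); objective: simpler.


-- ===== PORT A =====
-- A's recursion: for i in range(0,K+1) with break, recursing on the list with position `index`
-- decremented.  The for-with-break is transliterated as `pvAloop` (counter i, remaining iterations
-- (K+1).toNat); the recursive call re-enters `pvAgo`.  `fuel = numbers.length` bounds the recursion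
-- depth (each call moves index one step toward the end of a list of unchanged length).
mutual
def pvAgo (fuel : Nat) (numbers : List Int) (K : Int) (index : Int) : List (List Int) :=
  match fuel with
  | 0 => []
  | f + 1 => pvAloop f numbers K index 0 ((K + 1).toNat)

def pvAloop (f : Nat) (numbers : List Int) (K : Int) (index : Int) (i : Int) (rem : Nat) :
    List (List Int) :=
  match rem with
  | 0 => []
  | r + 1 =>
    if PySem.List.pyGetD numbers index 0 - i ≥ 1 then
      (if index = (numbers.length : Int) - 1 then
        [PySem.List.slice numbers none (some index) ++ [PySem.List.pyGetD numbers index 0 - i]]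
      else
        pvAgo f
          (PySem.List.slice numbers none (some index) ++
            [PySem.List.pyGetD numbers index 0 - i] ++
            PySem.List.slice numbers (some (index + 1)) none)
          K (index + 1)) ++
      pvAloop f numbers K index (i + 1) r
    else []
end

-- the assert totalizes the port: outside 0 <= index < len(numbers) Python raises (excluded by Pre_)
def make_a_list_of_shortcuts (numbers : List Int) (K : Int) (index : Int) : List (List Int) :=
  if 0 ≤ index ∧ index < (numbers.length : Int) then
    pvAgo numbers.length numbers K index
  else []

-- ===== PORT B =====
def make_a_list_of_shortcuts_alt (numbers : List Int) (K : Int) (index : Int) : List (List Int) :=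
  if 0 ≤ index ∧ index < (numbers.length : Int) then
    (PySem.List.pyRange index (numbers.length : Int) 1).foldl
      (fun res j =>
        if res.isEmpty then res
        else
          let x := PySem.List.pyGetD numbers j 0
          let vals := PySem.List.pyRange x (max (x - K - 1) 0) (-1)
          res.flatMap (fun c => vals.map (fun v => c ++ [v])))
      [PySem.List.slice numbers none (some index)]
  else []

-- ===== PRECONDITION & SPEC =====
-- Pre_: exactly the inputs the Python assert admits (otherwise A raises AssertionError).
def Pre_make_a_list_of_shortcuts (numbers : List Int) (K : Int) (index : Int) : Prop :=
  0 ≤ index ∧ index < (numbers.length : Int)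
instance (numbers : List Int) (K : Int) (index : Int) :
    Decidable (Pre_make_a_list_of_shortcuts numbers K index) := by
  unfold Pre_make_a_list_of_shortcuts; infer_instance

def pvWitness_make_a_list_of_shortcuts : List Int × Int × Int := ([3, 2], 1, 0)

def Spec_make_a_list_of_shortcuts (numbers : List Int) (K : Int) (index : Int)
    (out : List (List Int)) : Prop := out = make_a_list_of_shortcuts_alt numbers K index
instance (numbers : List Int) (K : Int) (index : Int) (out : List (List Int)) :
    Decidable (Spec_make_a_list_of_shortcuts numbers K index out) := by
  unfold Spec_make_a_list_of_shortcuts; infer_instance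

-- ===== CLAIM (what is proved, stated in full; the proofs are below) =====
def Claim_equal_make_a_list_of_shortcuts : Prop := ∀ (numbers : List Int) (K : Int) (index : Int), Dom_make_a_list_of_shortcuts numbers K index → Pre_make_a_list_of_shortcuts numbers K index → Spec_make_a_list_of_shortcuts numbers K index (make_a_list_of_shortcuts numbers K index)

-- ===== LEMMAS AND PROOFS =====

-- B's fold step, named for the proofs (definitionally the lambda in the alt port).
def pvStep (numbers : List Int) (K : Int) (res : List (List Int)) (j : Int) : List (List Int) :=
  res.flatMap (fun c =>
    (PySem.List.pyRange (PySem.List.pyGetD numbers j 0)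
        (max (PySem.List.pyGetD numbers j 0 - K - 1) 0) (-1)).map (fun v => c ++ [v]))

-- the descending value list B computes at a position holding x
def pvVals (x K : Int) : List Int :=
  PySem.List.pyRange x (max (x - K - 1) 0) (-1)

-- the value sequence A's for-with-break emits at a position holding x, from counter i, rem left
def pvChunk (x i : Int) (r : Nat) : List Int :=
  match r with
  | 0 => []
  | r + 1 => if x - i ≥ 1 then (x - i) :: pvChunk x (i + 1) r else []

-- what A does with one chosen value v at position index
def pvChild (f : Nat) (numbers : List Int) (K : Int) (index : Int) (v : Int) : List (List Int) :=
  if index = (numbers.length : Int) - 1 then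
    [PySem.List.slice numbers none (some index) ++ [v]]
  else
    pvAgo f
      (PySem.List.slice numbers none (some index) ++ [v] ++
        PySem.List.slice numbers (some (index + 1)) none)
      K (index + 1)

lemma pvAloop_eq_flatMap (f : Nat) (numbers : List Int) (K : Int) (index : Int) :
    ∀ (r : Nat) (i : Int),
      pvAloop f numbers K index i r =
        (pvChunk (PySem.List.pyGetD numbers index 0) i r).flatMap (pvChild f numbers K index) := by
  intro r
  induction r with
  | zero => intro i; simp [pvAloop, pvChunk]
  | succ r ih =>
    intro i
    by_cases h : PySem.List.pyGetD numbers index 0 - i ≥ 1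
    · rw [pvAloop, if_pos h, ih (i + 1)]
      rw [pvChunk, if_pos h, List.flatMap_cons]
      rfl
    · rw [pvAloop, if_neg h, pvChunk, if_neg h]
      rfl

lemma pv_foldl_flatMap {α β : Type} (F : β → α → List α) (js : List β) :
    ∀ init : List α,
      js.foldl (fun res j => res.flatMap (F j)) init =
        init.flatMap (fun c => js.foldl (fun res j => res.flatMap (F j)) [c]) := by
  induction js with
  | nil => intro init; simp
  | cons j js ih =>
    intro init
    simp only [List.foldl_cons]
    rw [ih (init.flatMap (F j)), List.flatMap_assoc]
    congr 1
    funext c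
    rw [← ih (F j c)]
    congr 1
    simp

-- pv_foldl_flatMap specialised to B's step function (eta-expanded form of the same lambda)
lemma pv_foldl_step (numbers : List Int) (K : Int) (js : List Int) (init : List (List Int)) :
    js.foldl (pvStep numbers K) init =
      init.flatMap (fun c => js.foldl (pvStep numbers K) [c]) :=
  pv_foldl_flatMap
    (fun j c =>
      (PySem.List.pyRange (PySem.List.pyGetD numbers j 0)
          (max (PySem.List.pyGetD numbers j 0 - K - 1) 0) (-1)).map (fun v => c ++ [v]))
    js init

lemma pvChunk_eq (x : Int) :
    ∀ (r : Nat) (i : Int),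
      pvChunk x i r = (List.range (min r (x - i).toNat)).map (fun t : Nat => x - i - (t : Int)) := by
  intro r
  induction r with
  | zero => intro i; simp [pvChunk]
  | succ r ih =>
    intro i
    by_cases h : x - i ≥ 1
    · have h1 : (x - i).toNat = (x - (i + 1)).toNat + 1 := by omega
      rw [pvChunk, if_pos h, ih (i + 1), h1, Nat.succ_min_succ, List.range_succ_eq_map]
      simp only [List.map_cons, List.map_map]
      refine List.cons_eq_cons.mpr ⟨by omega, ?_⟩
      apply List.map_congr_left
      intro t _
      simp only [Function.comp, Nat.succ_eq_add_one]
      push_cast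
      ring
    · have h1 : (x - i).toNat = 0 := by omega
      simp [pvChunk, h, h1]

lemma pvVals_eq (x K : Int) :
    pvVals x K = (List.range (min (K + 1).toNat x.toNat)).map (fun t : Nat => x - (t : Int)) := by
  unfold pvVals
  rw [PySem.List.pyRange_neg_one]
  have h1 : (x - max (x - K - 1) 0).toNat = min (K + 1).toNat x.toNat := by omega
  rw [h1]

lemma pvChunk_full (x K : Int) : pvChunk x 0 ((K + 1).toNat) = pvVals x K := by
  rw [pvChunk_eq, pvVals_eq]
  have h1 : (x - 0).toNat = x.toNat := by omega
  rw [h1]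
  apply List.map_congr_left
  intro t _
  ring

lemma pv_main (d : Nat) : ∀ (f : Nat) (numbers : List Int) (K : Int) (k : Nat),
    k < numbers.length → numbers.length - k ≤ d → numbers.length - k ≤ f →
    pvAgo f numbers K (k : Int) =
      (PySem.List.pyRange (k : Int) (numbers.length : Int) 1).foldl (pvStep numbers K)
        [numbers.take k] := by
  induction d with
  | zero => intro f numbers K k hk hd hf; omega
  | succ d ih =>
    intro f numbers K k hk hd hf
    cases f with
    | zero => omega
    | succ f =>
      set n := numbers.length with hn
      set x := PySem.List.pyGetD numbers (k : Int) 0 with hx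
      -- unfold one level of A and characterise the loop
      rw [pvAgo, pvAloop_eq_flatMap, ← hx, pvChunk_full]
      -- unfold one step of B
      rw [PySem.List.pyRange_one_cons (by exact_mod_cast hk), List.foldl_cons]
      have hstep : pvStep numbers K [numbers.take k] (k : Int) =
          (pvVals x K).map (fun v => numbers.take k ++ [v]) := by
        simp [pvStep, pvVals, hx]
      rw [hstep, pv_foldl_step, List.flatMap_map]
      congr 1
      funext v
      by_cases hlast : (k : Int) = (n : Int) - 1
      · rw [pvChild, if_pos hlast]
        rw [show ((k : Int) + 1) = (n : Int) by omega] at *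
        rw [PySem.List.pyRange_one_eq_nil (le_refl _), List.foldl_nil,
          PySem.List.slice_to_natCast]
      · rw [pvChild, if_neg hlast]
        rw [PySem.List.slice_to_natCast,
          show ((k : Int) + 1) = ((k + 1 : Nat) : Int) by push_cast; ring,
          PySem.List.slice_from_natCast]
        set L : List Int := numbers.take k ++ [v] ++ numbers.drop (k + 1) with hL
        have hlen1 : (numbers.take k ++ [v]).length = k + 1 := by
          simp [List.length_take]; omega
        have hLlen : L.length = n := by
          simp [hL, List.length_take]; omega
        rw [ih f L K (k + 1) (by omega) (by omega) (by omega), hLlen]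
        have htake : L.take (k + 1) = numbers.take k ++ [v] := by
          rw [hL, List.take_left' hlen1]
        rw [htake]
        apply PySem.List.foldl_congr_mem
        intro acc j hj
        have hjr := (PySem.List.mem_pyRange_one).mp hj
        have hget : PySem.List.pyGetD L j 0 = PySem.List.pyGetD numbers j 0 := by
          rw [PySem.List.pyGetD_eq_getElem L 0 (by omega) (by rw [hLlen]; omega),
            PySem.List.pyGetD_eq_getElem numbers 0 (by omega) (by omega)]
          simp only [hL]
          rw [List.getElem_append_right (by rw [hlen1]; omega)]
          rw [List.getElem_drop]
          exact getElem_congr rfl (by rw [hlen1]; omega) (by omega)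
        simp [pvStep, hget]

-- ===== VERDICT (by name: the statement is the Claim_ definition above) =====
theorem make_a_list_of_shortcuts_spec : Claim_equal_make_a_list_of_shortcuts := by
  intro numbers K index _ hpre
  obtain ⟨h0, hlt⟩ := hpre
  unfold Spec_make_a_list_of_shortcuts make_a_list_of_shortcuts make_a_list_of_shortcuts_alt
  rw [if_pos ⟨h0, hlt⟩, if_pos ⟨h0, hlt⟩]
  have hfun : (fun (res : List (List Int)) (j : Int) =>
      if res.isEmpty then res
      else
        let x := PySem.List.pyGetD numbers j 0
        let vals := PySem.List.pyRange x (max (x - K - 1) 0) (-1)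
        res.flatMap (fun c => vals.map (fun v => c ++ [v]))) = pvStep numbers K := by
    funext res j
    cases res with
    | nil => simp [pvStep]
    | cons a l => simp [pvStep]
  rw [hfun]
  have hk : index = ((index.toNat : Nat) : Int) := by omega
  rw [hk] at hlt ⊢
  rw [pv_main numbers.length numbers.length numbers K index.toNat (by omega) (by omega) (by omega)]
  rw [PySem.List.slice_to_natCast]
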